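-- pv_equiv track=rewrite | github.com/Edgardosalas/INF_111 | Python/Validacion de datos/si.py | valida_contra
-- ===== SOURCE A (Python) =====
-- def valida_contra(w):
--     # Comprobar que la entrada tiene al menos 6 caracteres
--     if len(w) < 6:
--         return False
--     # Comprobar que la entrada contiene al menos una letra y un número
--     l = False
--     num = False
--     for i in w:
--         if i.isalpha():
--             l = True
--         elif i.isnumeric():
--             num = True
--     return l and num
-- ===== SOURCE B (Python) =====
-- # Character-set approach: build the set of distinct characters once and test it
-- # against literal ASCII letter/digit alphabets (exact on the printable-ASCII domain).
-- LETTERS = set("abcdefghijklmnopqrstuvwxyzABCDEFGHIJKLMNOPQRSTUVWXYZ")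
-- DIGITS = set("0123456789")
--
-- def valida_contra(w):
--     if len(w) < 6:
--         return False
--     cs = set(w)
--     return not cs.isdisjoint(LETTERS) and not cs.isdisjoint(DIGITS)
-- ===== Notes on version B (the rewrite author's own statement) =====
-- stated objective: alternative
-- what changed: Replaces per-character classification with flag accumulation by building the set of distinct characters once and testing it for non-disjointness with literal ASCII letter and digit alphabets.
import Mathlib
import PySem

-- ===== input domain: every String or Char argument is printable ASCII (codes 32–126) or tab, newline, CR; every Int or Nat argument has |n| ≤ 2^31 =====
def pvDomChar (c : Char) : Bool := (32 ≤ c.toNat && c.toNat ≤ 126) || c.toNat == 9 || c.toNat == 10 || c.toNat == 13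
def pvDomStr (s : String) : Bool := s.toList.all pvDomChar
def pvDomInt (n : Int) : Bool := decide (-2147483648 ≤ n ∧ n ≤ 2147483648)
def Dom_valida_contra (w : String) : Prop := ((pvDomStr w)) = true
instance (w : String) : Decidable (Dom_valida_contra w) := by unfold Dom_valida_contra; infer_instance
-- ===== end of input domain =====

-- B replaces A's per-character flag-accumulating classification loop with a distinct-character
-- set built once and tested for non-disjointness against literal ASCII letter/digit alphabets
-- (exact on the printable-ASCII domain).


-- ===== PORT A =====
def valida_contra (w : String) : Bool :=
  if PySem.Str.len w < 6 then false
  else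
    let p := w.toList.foldl (fun (p : Bool × Bool) i =>
      if PySem.Chars.isalpha i then (true, p.2)
      -- i.isnumeric(): PySem.Chars.isdigit is exact on the printable-ASCII domain, where isnumeric = isdigit
      else if PySem.Chars.isdigit i then (p.1, true)
      else p) (false, false)
    p.1 && p.2

-- ===== PORT B =====
def pvLETTERS : PySem.Set Char :=
  PySem.Set.ofList "abcdefghijklmnopqrstuvwxyzABCDEFGHIJKLMNOPQRSTUVWXYZ".toList
def pvDIGITS : PySem.Set Char := PySem.Set.ofList "0123456789".toList

def valida_contra_alt (w : String) : Bool :=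
  if PySem.Str.len w < 6 then false
  else
    let cs := PySem.Set.ofList w.toList
    !(PySem.Set.isdisjoint cs pvLETTERS) && !(PySem.Set.isdisjoint cs pvDIGITS)

-- ===== PRECONDITION & SPEC =====
def Spec_valida_contra (w : String) (out : Bool) : Prop := out = valida_contra_alt w
instance (w : String) (out : Bool) : Decidable (Spec_valida_contra w out) := by unfold Spec_valida_contra; infer_instance

-- ===== CLAIM (what is proved, stated in full; the proofs are below) =====
def Claim_equal_valida_contra : Prop := ∀ (w : String), Dom_valida_contra w → Spec_valida_contra w (valida_contra w)

-- ===== LEMMAS AND PROOFS =====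

lemma alpha_digit_disjoint (c : Char) (h : PySem.Chars.isalpha c = true) :
    PySem.Chars.isdigit c = false := by
  simp only [PySem.Chars.isalpha, PySem.Chars.isdigit, PySem.Chars.isupper, PySem.Chars.islower,
    Bool.or_eq_true, Bool.and_eq_true, decide_eq_true_eq, Bool.and_eq_false_iff,
    decide_eq_false_iff_not, Char.le_def, UInt32.le_iff_toNat_le] at *
  have h9 : '9'.val.toNat = 57 := rfl
  have h0 : '0'.val.toNat = 48 := rfl
  have hA : 'A'.val.toNat = 65 := rfl
  have hZ : 'Z'.val.toNat = 90 := rfl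
  have ha : 'a'.val.toNat = 97 := rfl
  have hz : 'z'.val.toNat = 122 := rfl
  right; omega

lemma fold_flags (l : List Char) (a n : Bool) :
    l.foldl (fun (p : Bool × Bool) i =>
      if PySem.Chars.isalpha i then (true, p.2)
      else if PySem.Chars.isdigit i then (p.1, true)
      else p) (a, n)
    = (a || l.any PySem.Chars.isalpha, n || l.any PySem.Chars.isdigit) := by
  induction l generalizing a n with
  | nil => simp
  | cons c t ih =>
    simp only [List.foldl_cons, List.any_cons]
    by_cases ha : PySem.Chars.isalpha c = true
    · simp [ha, alpha_digit_disjoint c ha, ih]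
    · by_cases hd : PySem.Chars.isdigit c = true
      · simp [ha, hd, ih]
      · simp [ha, hd, ih]

lemma char_eq_iff_toNat (c d : Char) : c = d ↔ c.toNat = d.toNat := by
  constructor
  · intro h; rw [h]
  · intro h
    apply Char.ext
    exact UInt32.toNat_inj.mp h

lemma mem_iff_toNat_mem (c : Char) (l : List Char) :
    c ∈ l ↔ c.toNat ∈ l.map Char.toNat := by
  constructor
  · exact fun h => List.mem_map_of_mem h
  · intro h
    obtain ⟨b, hb, hbe⟩ := List.mem_map.mp h
    rwa [(char_eq_iff_toNat b c).mpr hbe] at hb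

set_option maxRecDepth 8192 in
lemma mem_letters_iff (c : Char) (h : c.toNat ≤ 126) :
    c ∈ pvLETTERS ↔ PySem.Chars.isalpha c = true := by
  have key : ∀ n : Nat, n < 127 →
      ((n ∈ (pvLETTERS : List Char).map Char.toNat) ↔
        (65 ≤ n ∧ n ≤ 90) ∨ (97 ≤ n ∧ n ≤ 122)) := by decide
  rw [mem_iff_toNat_mem, key c.toNat (by omega)]
  simp only [PySem.Chars.isalpha, PySem.Chars.isupper, PySem.Chars.islower,
    Bool.or_eq_true, Bool.and_eq_true, decide_eq_true_eq, Char.le_def,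
    UInt32.le_iff_toNat_le]
  have hA : 'A'.val.toNat = 65 := rfl
  have hZ : 'Z'.val.toNat = 90 := rfl
  have ha : 'a'.val.toNat = 97 := rfl
  have hz : 'z'.val.toNat = 122 := rfl
  have hv : c.toNat = c.val.toNat := rfl
  omega

set_option maxRecDepth 8192 in
lemma mem_digits_iff (c : Char) (h : c.toNat ≤ 126) :
    c ∈ pvDIGITS ↔ PySem.Chars.isdigit c = true := by
  have key : ∀ n : Nat, n < 127 →
      ((n ∈ (pvDIGITS : List Char).map Char.toNat) ↔ (48 ≤ n ∧ n ≤ 57)) := by decide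
  rw [mem_iff_toNat_mem, key c.toNat (by omega)]
  simp only [PySem.Chars.isdigit, Bool.and_eq_true, decide_eq_true_eq, Char.le_def,
    UInt32.le_iff_toNat_le]
  have h0 : '0'.val.toNat = 48 := rfl
  have h9 : '9'.val.toNat = 57 := rfl
  have hv : c.toNat = c.val.toNat := rfl
  omega

lemma not_disjoint_eq_any (l : List Char) (s : PySem.Set Char)
    (p : Char → Bool) (hp : ∀ c ∈ l, (c ∈ s ↔ p c = true)) :
    (!(PySem.Set.isdisjoint (PySem.Set.ofList l) s)) = l.any p := by
  by_cases hd : PySem.Set.isdisjoint (PySem.Set.ofList l) s = true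
  · have := (PySem.Set.isdisjoint_iff _ _).mp hd
    simp only [hd, Bool.not_true]
    symm
    rw [List.any_eq_false]
    intro c hc hpc
    exact this c (by simpa [PySem.Set.mem_ofList] using hc) ((hp c hc).mpr hpc)
  · have hd' : PySem.Set.isdisjoint (PySem.Set.ofList l) s = false :=
      Bool.eq_false_iff.mpr hd
    have : ¬ ∀ x ∈ PySem.Set.ofList l, x ∉ s := fun h =>
      hd ((PySem.Set.isdisjoint_iff _ _).mpr h)
    push Not at this
    obtain ⟨x, hx, hxs⟩ := this
    have hxl : x ∈ l := by simpa [PySem.Set.mem_ofList] using hx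
    simp only [hd', Bool.not_false]
    symm
    rw [List.any_eq_true]
    exact ⟨x, hxl, (hp x hxl).mp hxs⟩

-- ===== VERDICT (by name: the statement is the Claim_ definition above) =====
theorem valida_contra_spec : Claim_equal_valida_contra := by
  intro w hdom
  unfold Spec_valida_contra valida_contra valida_contra_alt
  have hall : ∀ c ∈ w.toList, c.toNat ≤ 126 := by
    intro c hc
    have := List.all_eq_true.mp hdom c hc
    simp only [pvDomChar, Bool.or_eq_true, Bool.and_eq_true, decide_eq_true_eq,
      beq_iff_eq] at this
    omega
  split_ifs with h
  · rfl
  · simp only [fold_flags, Bool.false_or]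
    rw [not_disjoint_eq_any w.toList pvLETTERS PySem.Chars.isalpha
          (fun c hc => mem_letters_iff c (hall c hc)),
        not_disjoint_eq_any w.toList pvDIGITS PySem.Chars.isdigit
          (fun c hc => mem_digits_iff c (hall c hc))]
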